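-- pv_equiv track=rewrite | github.com/aitoruriapersonal/documentacionGenerica | genera_torneo.py | remove_variations
-- ===== SOURCE A (Python) =====
-- def remove_variations(text):
--     """Remove nested parenthetical variations."""
--     result = []
--     depth = 0
--     for ch in text:
--         if ch == '(':
--             depth += 1
--         elif ch == ')':
--             if depth > 0:
--                 depth -= 1
--         elif depth == 0:
--             result.append(ch)
--     return ''.join(result)
-- ===== SOURCE B (Python) =====
-- def remove_variations(text):
--     """Remove nested parenthetical variations."""
--     out = []
--     i = 0
--     n = len(text)
--     while i < n:
--         ch = text[i]
--         if ch == '(':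
--             i += 1
--             depth = 1
--             while i < n and depth > 0:
--                 if text[i] == '(':
--                     depth += 1
--                 elif text[i] == ')':
--                     depth -= 1
--                 i += 1
--         elif ch == ')':
--             i += 1
--         else:
--             out.append(ch)
--             i += 1
--     return ''.join(out)
-- ===== Notes on version B (the rewrite author's own statement) =====
-- stated objective: alternative
-- what changed: Replaces the single pass with a global depth counter by an index walk that, on '(', runs an inner skip-loop consuming the whole parenthesised group (tracking a local depth) and drops a top-level ')' directly.
import Mathlib
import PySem

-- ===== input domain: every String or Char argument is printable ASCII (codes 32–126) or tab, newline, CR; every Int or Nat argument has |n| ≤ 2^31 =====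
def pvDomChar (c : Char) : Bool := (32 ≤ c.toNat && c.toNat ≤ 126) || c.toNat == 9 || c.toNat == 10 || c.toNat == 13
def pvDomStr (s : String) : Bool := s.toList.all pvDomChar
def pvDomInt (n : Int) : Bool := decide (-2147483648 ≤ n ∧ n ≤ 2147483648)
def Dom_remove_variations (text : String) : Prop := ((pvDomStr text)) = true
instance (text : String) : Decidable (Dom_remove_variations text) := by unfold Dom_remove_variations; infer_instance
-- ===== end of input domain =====

-- B replaces A's single pass with a global depth counter by an index walk whose inner
-- skip-loop consumes each parenthesised group (objective: alternative decomposition).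


-- ===== PORT A =====
-- for ch in text: maintain (result, depth); finally ''.join(result)
def remove_variations (text : String) : String :=
  let st := text.toList.foldl (fun (st : List Char × Nat) ch =>
    if ch = '(' then (st.1, st.2 + 1)
    else if ch = ')' then (st.1, if st.2 > 0 then st.2 - 1 else st.2)
    else if st.2 = 0 then (st.1 ++ [ch], st.2) else st) ([], 0)
  String.ofList st.1

-- ===== PORT B =====
-- inner while-loop: consume characters, adjusting a local depth, until it hits 0 or the end
def pvSkipGroup : List Char → Nat → List Char
  | cs, 0 => cs
  | [], _ + 1 => []
  | c :: rest, d + 1 =>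
      if c = '(' then pvSkipGroup rest (d + 2)
      else if c = ')' then pvSkipGroup rest d
      else pvSkipGroup rest (d + 1)

theorem pvSkipGroup_length_le (cs : List Char) (d : Nat) :
    (pvSkipGroup cs d).length ≤ cs.length := by
  induction cs generalizing d with
  | nil => cases d <;> simp [pvSkipGroup]
  | cons c rest ih =>
      cases d with
      | zero => simp [pvSkipGroup]
      | succ d =>
          simp only [pvSkipGroup]
          split_ifs <;> exact le_trans (ih _) (Nat.le_succ _)

-- outer while-loop over the remaining characters
def pvWalk : List Char → List Char
  | [] => []
  | c :: rest =>
      if c = '(' then pvWalk (pvSkipGroup rest 1)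
      else if c = ')' then pvWalk rest
      else c :: pvWalk rest
termination_by cs => cs.length
decreasing_by
  · exact Nat.lt_succ_of_le (pvSkipGroup_length_le rest 1)
  · simp
  · simp

def remove_variations_alt (text : String) : String :=
  String.ofList (pvWalk text.toList)

-- ===== PRECONDITION & SPEC =====
def Spec_remove_variations (text : String) (out : String) : Prop := out = remove_variations_alt text
instance (text : String) (out : String) : Decidable (Spec_remove_variations text out) := by unfold Spec_remove_variations; infer_instance

-- ===== CLAIM (what is proved, stated in full; the proofs are below) =====
def Claim_equal_remove_variations : Prop := ∀ (text : String), Dom_remove_variations text → Spec_remove_variations text (remove_variations text)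

-- ===== LEMMAS AND PROOFS =====
-- recursive reading of A's loop (kept chars only)
def pvKeep : List Char → Nat → List Char
  | [], _ => []
  | c :: rest, d =>
      if c = '(' then pvKeep rest (d + 1)
      else if c = ')' then pvKeep rest (if d > 0 then d - 1 else d)
      else if d = 0 then c :: pvKeep rest d else pvKeep rest d

theorem pvFoldl_eq_keep (cs : List Char) (acc : List Char) (d : Nat) :
    (cs.foldl (fun (st : List Char × Nat) ch =>
      if ch = '(' then (st.1, st.2 + 1)
      else if ch = ')' then (st.1, if st.2 > 0 then st.2 - 1 else st.2)
      else if st.2 = 0 then (st.1 ++ [ch], st.2) else st) (acc, d)).1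
    = acc ++ pvKeep cs d := by
  induction cs generalizing acc d with
  | nil => simp [pvKeep]
  | cons c rest ih =>
      simp only [List.foldl_cons, pvKeep]
      by_cases h1 : c = '('
      · simp [h1, ih]
      · by_cases h2 : c = ')'
        · simp [h2, ih]
        · by_cases h3 : d = 0 <;> simp [h1, h2, h3, ih]

theorem pvKeep_eq_walk (cs : List Char) (d : Nat) :
    pvKeep cs d = pvWalk (pvSkipGroup cs d) := by
  induction cs generalizing d with
  | nil => cases d <;> simp [pvKeep, pvSkipGroup, pvWalk]
  | cons c rest ih =>
      cases d with
      | zero =>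
          by_cases h1 : c = '('
          · simp [pvKeep, pvSkipGroup, pvWalk, h1, ih]
          · by_cases h2 : c = ')'
            · have hz : pvSkipGroup rest 0 = rest := by cases rest <;> rfl
              simpa [pvKeep, pvSkipGroup, pvWalk, h1, h2, hz] using ih 0
            · have hz : pvSkipGroup rest 0 = rest := by cases rest <;> rfl
              simpa [pvKeep, pvSkipGroup, pvWalk, h1, h2, hz] using ih 0
      | succ d =>
          by_cases h1 : c = '('
          · simpa [pvKeep, pvSkipGroup, h1] using ih (d + 2)
          · by_cases h2 : c = ')'
            · cases d with
              | zero =>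
                  have hz : pvSkipGroup rest 0 = rest := by cases rest <;> rfl
                  simpa [pvKeep, pvSkipGroup, h1, h2, hz] using ih 0
              | succ d' => simpa [pvKeep, pvSkipGroup, h1, h2] using ih (d' + 1)
            · simpa [pvKeep, pvSkipGroup, h1, h2] using ih (d + 1)

-- ===== VERDICT (by name: the statement is the Claim_ definition above) =====
theorem remove_variations_spec : Claim_equal_remove_variations := by
  intro text _
  show remove_variations text = remove_variations_alt text
  have h := pvFoldl_eq_keep text.toList [] 0
  simp only [List.nil_append] at h
  show String.ofList (text.toList.foldl _ ([], 0)).1 = _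
  rw [h, pvKeep_eq_walk]
  have hz : pvSkipGroup text.toList 0 = text.toList := by cases text.toList <;> rfl
  rw [hz]
  rfl
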